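-- pv_equiv track=rewrite | github.com/anshikaCSE007/DSA | Arrays/MaximumPositivity/maximumpositivity.py | solve
-- ===== SOURCE A (Python) =====
-- def solve(A):
--     n = len(A);
--
--     l = 0;
--     ans = 0;
--     st = -1;
--     end = -1;
--     maxSt = 0;
--     minSt = 0;
--
--     for i in range(n):
--         if(A[i] > 0):
--             l+=1;
--
--             if(st == -1):
--                 st = i;
--
--             end = i;
--
--             if(l > ans):
--                 minSt = st;
--                 maxSt = end;
--
--             ans = max(ans, l);
--
--         else:
--             st = -1;
--             end = -1;
--             l = 0;
--
--
--     return A[minSt:maxSt+1];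
-- ===== SOURCE B (Python) =====
-- def solve(A):
--     # Collect maximal runs of positive values; keep the first strictly longest run.
--     best = []
--     cur = []
--     for x in A:
--         if x > 0:
--             cur.append(x)
--         else:
--             if len(cur) > len(best):
--                 best = cur
--             cur = []
--     if len(cur) > len(best):
--         best = cur
--     # no positive run at all: reproduce A's fallback slice A[0:1]
--     return best if best else A[0:1]
-- ===== Notes on version B (the rewrite author's own statement) =====
-- stated objective: simpler
-- what changed: B collects the positive runs as value lists and keeps the first strictly longest one, instead of A's six index/length counters (l, ans, st, end, maxSt, minSt) followed by a final slice; when no positive run exists B falls back to A[0:1] like A does.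
import Mathlib
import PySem

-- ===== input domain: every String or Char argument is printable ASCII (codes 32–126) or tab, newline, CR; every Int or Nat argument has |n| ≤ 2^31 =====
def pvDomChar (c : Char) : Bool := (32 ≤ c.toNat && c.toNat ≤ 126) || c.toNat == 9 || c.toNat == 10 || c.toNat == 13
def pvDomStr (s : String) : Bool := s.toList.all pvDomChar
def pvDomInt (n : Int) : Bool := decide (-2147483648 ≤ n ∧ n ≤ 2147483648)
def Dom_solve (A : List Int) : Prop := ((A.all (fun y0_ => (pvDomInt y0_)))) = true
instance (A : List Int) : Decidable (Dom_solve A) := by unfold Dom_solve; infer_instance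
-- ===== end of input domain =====

-- B keeps the positive runs as value lists (first strictly longest wins) instead of A's
-- index/length counters plus a final slice; objective: simpler.

-- ===== PORT A =====
-- state = (l, ans, st, end, maxSt, minSt), exactly A's variables
def solveStep (A : List Int) (s : Int × Int × Int × Int × Int × Int) (i : Int) :
    Int × Int × Int × Int × Int × Int :=
  match s with
  | (l, ans, st, _en, maxSt, minSt) =>
    if PySem.List.pyGetD A i 0 > 0 then
      let l := l + 1
      let st := if st = -1 then i else st
      let en := i
      let minSt := if l > ans then st else minSt
      let maxSt := if l > ans then en else maxSt
      let ans := max ans l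
      (l, ans, st, en, maxSt, minSt)
    else
      (0, ans, -1, -1, maxSt, minSt)

def solve (A : List Int) : List Int :=
  let n : Int := A.length
  let s := (PySem.List.pyRange 0 n 1).foldl (solveStep A) (0, 0, -1, -1, 0, 0)
  PySem.List.slice A (some s.2.2.2.2.2) (some (s.2.2.2.2.1 + 1))

-- ===== PORT B =====
def solveAltStep (s : List Int × List Int) (x : Int) : List Int × List Int :=
  match s with
  | (best, cur) =>
    if x > 0 then (best, cur ++ [x])
    else (if cur.length > best.length then cur else best, [])

def solve_alt (A : List Int) : List Int :=
  match A.foldl solveAltStep ([], []) with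
  | (best, cur) =>
    let best := if cur.length > best.length then cur else best
    -- no positive run at all: reproduce A's fallback slice A[0:1]
    if best ≠ [] then best else PySem.List.slice A (some 0) (some 1)

-- ===== PRECONDITION & SPEC =====
def Spec_solve (A : List Int) (out : List Int) : Prop := out = solve_alt A
instance (A : List Int) (out : List Int) : Decidable (Spec_solve A out) := by
  unfold Spec_solve; infer_instance

-- ===== CLAIM (what is proved, stated in full; the proofs are below) =====
def Claim_equal_solve : Prop := ∀ (A : List Int), Dom_solve A → Spec_solve A (solve A)

-- ===== LEMMAS AND PROOFS =====

-- the run currently winning on B's side (first strictly longest)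
def champ (best cur : List Int) : List Int := if best.length < cur.length then cur else best

-- joint invariant tying A's (maxSt, minSt) to B's (best, cur) over the processed prefix `pre`
def InvS (pre best cur : List Int) (maxSt minSt : Int) : Prop :=
  (∃ p, pre = p ++ cur) ∧
  ((∃ x ∈ pre, 0 < x) → champ best cur ≠ []) ∧
  ((champ best cur = [] ∧ minSt = 0 ∧ maxSt = 0) ∨
   (champ best cur ≠ [] ∧ 0 ≤ minSt ∧ maxSt + 1 ≤ (pre.length : Int) ∧
    maxSt + 1 = minSt + (champ best cur).length ∧
    PySem.List.slice pre (some minSt) (some (maxSt + 1)) = champ best cur))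

lemma slice_append_left (pre ys : List Int) (a b : Int) (ha : 0 ≤ a) (hab : a ≤ b)
    (hb : b ≤ (pre.length : Int)) :
    PySem.List.slice (pre ++ ys) (some a) (some b) = PySem.List.slice pre (some a) (some b) := by
  have hb0 : 0 ≤ b := le_trans ha hab
  rw [PySem.List.slice_toNat _ ha hb0, PySem.List.slice_toNat _ ha hb0]
  have h1 : a.toNat ≤ pre.length := by omega
  have h2 : b.toNat - a.toNat ≤ (pre.drop a.toNat).length := by
    simp [List.length_drop]; omega
  rw [List.drop_append_of_le_length h1, List.take_append_of_le_length h2]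

lemma slice_run (p q : List Int) (ys : List Int) :
    PySem.List.slice (p ++ q ++ ys) (some (p.length : Int))
      (some ((p.length : Int) + (q.length : Int))) = q := by
  have := PySem.List.slice_natCast_add (p ++ q ++ ys) p.length q.length
  rw [this]
  rw [List.append_assoc, List.drop_left, List.take_append_of_le_length (le_refl _)]
  simp

lemma pyGetD_append_mid (pre : List Int) (x : Int) (xs : List Int) :
    PySem.List.pyGetD (pre ++ x :: xs) ((pre.length : Int)) 0 = x := by
  rw [PySem.List.pyGetD_natCast]
  simp [List.getD]

lemma champ_nil_right (q : List Int) : champ q [] = q := by simp [champ]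

lemma champ_eq_cur {b c : List Int} (h : b.length < c.length) : champ b c = c := by
  unfold champ; exact if_pos h

lemma champ_eq_best {b c : List Int} (h : ¬ b.length < c.length) : champ b c = b := by
  unfold champ; exact if_neg h

lemma length_champ (b c : List Int) : (champ b c).length = max b.length c.length := by
  unfold champ; split_ifs with h <;> omega

lemma inv_step (xs : List Int) : ∀ (pre best cur : List Int) (en maxSt minSt : Int),
    InvS pre best cur maxSt minSt →
    ∃ en' maxSt' minSt',
      (PySem.List.pyRange (pre.length : Int) ((pre.length : Int) + (xs.length : Int)) 1).foldl
          (solveStep (pre ++ xs))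
          ((cur.length : Int), ((max best.length cur.length : Nat) : Int),
           (if cur = [] then (-1 : Int) else (pre.length : Int) - (cur.length : Int)),
           en, maxSt, minSt)
        = (((xs.foldl solveAltStep (best, cur)).2.length : Int),
           ((max (xs.foldl solveAltStep (best, cur)).1.length
                 (xs.foldl solveAltStep (best, cur)).2.length : Nat) : Int),
           (if (xs.foldl solveAltStep (best, cur)).2 = [] then (-1 : Int)
            else ((pre ++ xs).length : Int) - ((xs.foldl solveAltStep (best, cur)).2.length : Int)),
           en', maxSt', minSt') ∧
      InvS (pre ++ xs) (xs.foldl solveAltStep (best, cur)).1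
        (xs.foldl solveAltStep (best, cur)).2 maxSt' minSt' := by
  induction xs with
  | nil =>
    intro pre best cur en maxSt minSt hInv
    refine ⟨en, maxSt, minSt, ?_, by simpa using hInv⟩
    rw [show ((pre.length : Int) + ((List.length ([] : List Int)) : Int)) = (pre.length : Int) by simp,
        PySem.List.pyRange_one_eq_nil (le_refl _)]
    simp
  | cons x xs ih =>
    intro pre best cur en maxSt minSt hInv
    obtain ⟨⟨p, hp⟩, hmem, hS⟩ := hInv
    have hcle : cur.length ≤ pre.length := by rw [hp]; simp
    -- peel the first index off the range
    rw [show ((pre.length : Int) + ((List.length (x :: xs)) : Int))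
          = ((pre.length : Int) + 1) + (xs.length : Int) by
        push_cast [List.length_cons]; ring]
    rw [PySem.List.pyRange_one_cons (by omega), List.foldl_cons]
    -- evaluate one step of A
    have hget : PySem.List.pyGetD (pre ++ x :: xs) ((pre.length : Int)) 0 = x :=
      pyGetD_append_mid pre x xs
    have hL : pre ++ x :: xs = (pre ++ [x]) ++ xs := by simp
    have e_pre : (((pre ++ [x]).length : Nat) : Int) = (pre.length : Int) + 1 := by
      push_cast [List.length_append, List.length_cons, List.length_nil]; ring
    by_cases hx : 0 < x
    · -- positive element
      have hstep : solveStep (pre ++ x :: xs)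
          ((cur.length : Int), ((max best.length cur.length : Nat) : Int),
           (if cur = [] then (-1 : Int) else (pre.length : Int) - (cur.length : Int)),
           en, maxSt, minSt) (pre.length : Int)
          = (((cur.length : Int) + 1),
             max ((max best.length cur.length : Nat) : Int) ((cur.length : Int) + 1),
             ((pre.length : Int) - (cur.length : Int)), (pre.length : Int),
             (if ((cur.length : Int) + 1) > ((max best.length cur.length : Nat) : Int)
                then (pre.length : Int) else maxSt),
             (if ((cur.length : Int) + 1) > ((max best.length cur.length : Nat) : Int)
                then (pre.length : Int) - (cur.length : Int) else minSt)) := by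
        simp only [solveStep, hget, if_pos hx]
        rcases eq_or_ne cur [] with hc | hc
        · simp [hc]
        · have : (pre.length : Int) - (cur.length : Int) ≠ -1 := by
            have : 0 < cur.length := List.length_pos_iff.mpr hc
            omega
          simp [hc, this]
      have hBstep : (x :: xs).foldl solveAltStep (best, cur)
          = xs.foldl solveAltStep (best, cur ++ [x]) := by
        simp [solveAltStep, hx]
      have e_cur : (((cur ++ [x]).length : Nat) : Int) = (cur.length : Int) + 1 := by
        push_cast [List.length_append, List.length_cons, List.length_nil]; ring
      have h1 : ((max best.length (cur ++ [x]).length : Nat) : Int)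
          = max ((max best.length cur.length : Nat) : Int) ((cur.length : Int) + 1) := by
        push_cast [List.length_append, List.length_cons, List.length_nil]; omega
      have e_st : (if cur ++ [x] = [] then (-1 : Int)
          else (((pre ++ [x]).length : Nat) : Int) - (((cur ++ [x]).length : Nat) : Int))
          = (pre.length : Int) - (cur.length : Int) := by
        rw [if_neg (by simp)]
        push_cast [List.length_append, List.length_cons, List.length_nil]; ring
      by_cases hbc : best.length ≤ cur.length
      · -- current run becomes the strict champion
        have hcond : ((cur.length : Int) + 1) > ((max best.length cur.length : Nat) : Int) := by
          push_cast; omega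
        have hch : champ best (cur ++ [x]) = cur ++ [x] :=
          champ_eq_cur (by simp [List.length_append]; omega)
        have hInv' : InvS (pre ++ [x]) best (cur ++ [x]) (pre.length : Int)
            ((pre.length : Int) - (cur.length : Int)) := by
          refine ⟨⟨p, by rw [hp]; simp⟩, fun _ => by rw [hch]; simp,
            Or.inr ⟨by rw [hch]; simp, by omega, by rw [e_pre], ?_, ?_⟩⟩
          · rw [hch]; push_cast [List.length_append, List.length_cons, List.length_nil]; ring
          · rw [hch]
            have hps : (pre.length : Int) - (cur.length : Int) = (p.length : Int) := by
              rw [hp]; push_cast [List.length_append]; ring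
            have hend : (pre.length : Int) + 1
                = (p.length : Int) + (((cur ++ [x]).length : Nat) : Int) := by
              rw [hp]; push_cast [List.length_append, List.length_cons, List.length_nil]; ring
            rw [hps, hend]
            have := slice_run p (cur ++ [x]) []
            simpa [hp] using this
        obtain ⟨en', maxSt', minSt', heq, hI⟩ :=
          ih (pre ++ [x]) best (cur ++ [x]) (pre.length : Int) (pre.length : Int)
            ((pre.length : Int) - (cur.length : Int)) hInv'
        rw [e_st, h1, e_cur, e_pre] at heq
        refine ⟨en', maxSt', minSt', ?_, by rw [hBstep, hL]; exact hI⟩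
        rw [hstep, if_pos hcond, if_pos hcond, hBstep, hL]
        exact heq
      · -- champion stays `best`
        have hcond : ¬ (((cur.length : Int) + 1) > ((max best.length cur.length : Nat) : Int)) := by
          push_cast; omega
        have hchold : champ best cur = best := champ_eq_best (by omega)
        have hbne : best ≠ [] := by
          intro h; rw [h] at hbc; simp at hbc
        rcases hS with ⟨hc0, _, _⟩ | ⟨_, hm0, hm1, hm2, hm3⟩
        · rw [hchold] at hc0; exact absurd hc0 hbne
        have hchnew : champ best (cur ++ [x]) = best :=
          champ_eq_best (by simp [List.length_append]; omega)
        have hInv' : InvS (pre ++ [x]) best (cur ++ [x]) maxSt minSt := by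
          refine ⟨⟨p, by rw [hp]; simp⟩, fun _ => by rw [hchnew]; exact hbne,
            Or.inr ⟨by rw [hchnew]; exact hbne, hm0, by rw [e_pre]; omega, ?_, ?_⟩⟩
          · rw [hchnew]; rw [hchold] at hm2; exact hm2
          · rw [hchnew]; rw [hchold] at hm3
            rw [← hm3]
            exact slice_append_left pre [x] minSt (maxSt + 1) hm0
              (by rw [hchold] at hm2; omega) hm1
        obtain ⟨en', maxSt', minSt', heq, hI⟩ :=
          ih (pre ++ [x]) best (cur ++ [x]) (pre.length : Int) maxSt minSt hInv'
        rw [e_st, h1, e_cur, e_pre] at heq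
        refine ⟨en', maxSt', minSt', ?_, by rw [hBstep, hL]; exact hI⟩
        rw [hstep, if_neg hcond, if_neg hcond, hBstep, hL]
        exact heq
    · -- non-positive element: run is finalized
      have hstep : solveStep (pre ++ x :: xs)
          ((cur.length : Int), ((max best.length cur.length : Nat) : Int),
           (if cur = [] then (-1 : Int) else (pre.length : Int) - (cur.length : Int)),
           en, maxSt, minSt) (pre.length : Int)
          = (0, ((max best.length cur.length : Nat) : Int), -1, -1, maxSt, minSt) := by
        simp only [solveStep, hget]
        rw [if_neg (by omega)]
      have hBstep : (x :: xs).foldl solveAltStep (best, cur)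
          = xs.foldl solveAltStep (champ best cur, []) := by
        simp only [List.foldl_cons, solveAltStep]
        rw [if_neg (by omega)]
        rfl
      have hInv' : InvS (pre ++ [x]) (champ best cur) [] maxSt minSt := by
        refine ⟨⟨pre ++ [x], by simp⟩, ?_, ?_⟩
        · intro ⟨y, hy, hy0⟩
          rw [champ_nil_right]
          apply hmem
          rcases List.mem_append.mp hy with h | h
          · exact ⟨y, h, hy0⟩
          · simp at h; omega
        · rw [champ_nil_right]
          rcases hS with ⟨h1, h2, h3⟩ | ⟨h1, h2, h3, h4, h5⟩
          · exact Or.inl ⟨h1, h2, h3⟩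
          · refine Or.inr ⟨h1, h2, by rw [e_pre]; omega, h4, ?_⟩
            rw [← h5]
            exact slice_append_left pre [x] minSt (maxSt + 1) h2 (by omega) h3
      obtain ⟨en', maxSt', minSt', heq, hI⟩ :=
        ih (pre ++ [x]) (champ best cur) [] (-1) maxSt minSt hInv'
      have e3 : (if ([] : List Int) = [] then (-1 : Int)
          else (((pre ++ [x]).length : Nat) : Int) - ((List.length ([] : List Int)) : Int))
          = -1 := by simp
      have e2 : ((max (champ best cur).length (List.length ([] : List Int)) : Nat) : Int)
          = ((max best.length cur.length : Nat) : Int) := by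
        rw [length_champ]; simp
      have e0 : ((List.length ([] : List Int)) : Int) = (0 : Int) := by simp
      rw [e3, e2, e0, e_pre] at heq
      refine ⟨en', maxSt', minSt', ?_, by rw [hBstep, hL]; exact hI⟩
      rw [hstep, hBstep, hL]
      exact heq

lemma inv_final (A : List Int) :
    ∃ maxSt' minSt',
      solve A = PySem.List.slice A (some minSt') (some (maxSt' + 1)) ∧
      ((∃ x ∈ A, 0 < x) →
        champ (A.foldl solveAltStep ([], [])).1 (A.foldl solveAltStep ([], [])).2 ≠ []) ∧
      ((champ (A.foldl solveAltStep ([], [])).1 (A.foldl solveAltStep ([], [])).2 = []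
          ∧ minSt' = 0 ∧ maxSt' = 0) ∨
       (champ (A.foldl solveAltStep ([], [])).1 (A.foldl solveAltStep ([], [])).2 ≠ [] ∧
        PySem.List.slice A (some minSt') (some (maxSt' + 1))
          = champ (A.foldl solveAltStep ([], [])).1 (A.foldl solveAltStep ([], [])).2)) := by
  have hInv0 : InvS [] [] [] 0 0 :=
    ⟨⟨[], rfl⟩, by simp, Or.inl ⟨by simp [champ], rfl, rfl⟩⟩
  obtain ⟨en', maxSt', minSt', heq, ⟨_, hmem, hS⟩⟩ :=
    inv_step A [] [] [] (-1) 0 0 hInv0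
  simp only [List.nil_append, List.length_nil, Nat.cast_zero, zero_add] at heq hmem hS
  refine ⟨maxSt', minSt', ?_, hmem, ?_⟩
  · unfold solve
    simp only []
    norm_num at heq
    rw [heq]
  · rcases hS with ⟨h1, h2, h3⟩ | ⟨h1, _, _, _, h5⟩
    · exact Or.inl ⟨h1, h2, h3⟩
    · exact Or.inr ⟨h1, h5⟩

lemma solve_alt_eq_champ (A : List Int) :
    solve_alt A =
      (if champ (A.foldl solveAltStep ([], [])).1 (A.foldl solveAltStep ([], [])).2 ≠ []
       then champ (A.foldl solveAltStep ([], [])).1 (A.foldl solveAltStep ([], [])).2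
       else PySem.List.slice A (some 0) (some 1)) := by
  unfold solve_alt champ
  rcases h : A.foldl solveAltStep ([], []) with ⟨b, c⟩
  simp

-- ===== VERDICT (by name: the statement is the Claim_ definition above) =====
theorem solve_spec : Claim_equal_solve := by
  unfold Claim_equal_solve Spec_solve
  intro A _
  obtain ⟨maxSt', minSt', hA, _, hS⟩ := inv_final A
  rw [hA, solve_alt_eq_champ]
  rcases hS with ⟨hc, hmin, hmax⟩ | ⟨hcne, hsl⟩
  · rw [if_neg (by simp [hc]), hmin, hmax]
    norm_num
  · rw [if_pos hcne, hsl]
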